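-- pv_equiv track=rewrite | github.com/seife/RaspyRFM | apps/rcprotocols.py | _decode_unit
-- ===== SOURCE A (Python) =====
-- def _decode_unit(unit):
-- 	i = 0
-- 	while unit:
-- 		i <<= 1
-- 		if unit[-1] == '0':
-- 			i |= 1
-- 		unit = unit[:-1]
-- 	return i + 1
-- ===== SOURCE B (Python) =====
-- def _decode_unit(unit):
--     if not unit:
--         return 1
--     flipped = ''.join('1' if c == '0' else '0' for c in reversed(unit))
--     return int(flipped, 2) + 1
-- ===== Notes on version B (the rewrite author's own statement) =====
-- stated objective: faster
-- what changed: Replaces the shift/or accumulator loop that re-slices unit[:-1] each iteration with a single reverse + bit-flip transform parsed by one int(s, 2) call.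
import Mathlib
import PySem

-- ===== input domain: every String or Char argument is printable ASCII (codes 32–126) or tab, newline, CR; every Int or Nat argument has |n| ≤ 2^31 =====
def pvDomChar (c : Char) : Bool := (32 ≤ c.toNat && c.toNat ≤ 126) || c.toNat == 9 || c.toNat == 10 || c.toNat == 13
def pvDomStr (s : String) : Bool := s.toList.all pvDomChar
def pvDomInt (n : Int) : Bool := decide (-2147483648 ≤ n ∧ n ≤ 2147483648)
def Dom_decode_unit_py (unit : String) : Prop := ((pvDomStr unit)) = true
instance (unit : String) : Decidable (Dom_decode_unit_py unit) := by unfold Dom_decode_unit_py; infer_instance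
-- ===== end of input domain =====

-- B replaces A's shift/or accumulator loop over repeated last-character slicing by a
-- reverse + bit-flip transform parsed with a single base-2 conversion (idiomatic; same values).

-- ===== PORT A =====
-- while loop: state (i, unit); each step i <<= 1, then i |= 1 iff last char is '0'
-- (i is even after the shift, so '| 1' is '+ 1'), then unit = unit[:-1].
def decode_unit_py_loop (i : Int) (cs : List Char) : Int :=
  if h : cs = [] then i
  else
    decode_unit_py_loop (2 * i + (if cs.getLast h = '0' then 1 else 0)) cs.dropLast
termination_by cs.length
decreasing_by
  have := List.length_pos_of_ne_nil h
  simp [List.length_dropLast]; omega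

def decode_unit_py (unit : String) : Int :=
  decode_unit_py_loop 0 unit.toList + 1

-- ===== PORT B =====
-- int(flipped, 2): base-2 parse of a string of '0'/'1' digits, ported as the standard digit fold.
def decode_unit_py_alt_parse2 (cs : List Char) : Int :=
  cs.foldl (fun a c => 2 * a + (if c = '1' then 1 else 0)) 0

def decode_unit_py_alt (unit : String) : Int :=
  if unit.toList = [] then 1
  else
    let flipped := unit.toList.reverse.map (fun c => if c = '0' then '1' else '0')
    decode_unit_py_alt_parse2 flipped + 1

-- ===== PRECONDITION & SPEC =====
def Spec_decode_unit_py (unit : String) (out : Int) : Prop := out = decode_unit_py_alt unit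
instance (unit : String) (out : Int) : Decidable (Spec_decode_unit_py unit out) := by unfold Spec_decode_unit_py; infer_instance

-- ===== CLAIM (what is proved, stated in full; the proofs are below) =====
def Claim_equal_decode_unit_py : Prop := ∀ (unit : String), Dom_decode_unit_py unit → Spec_decode_unit_py unit (decode_unit_py unit)

-- ===== LEMMAS AND PROOFS =====

theorem decode_unit_py_loop_eq (cs : List Char) : ∀ i : Int,
    decode_unit_py_loop i cs =
      cs.reverse.foldl (fun a c => 2 * a + (if c = '0' then 1 else 0)) i := by
  induction cs using List.reverseRecOn with
  | nil => intro i; simp [decode_unit_py_loop]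
  | append_singleton ds c ih =>
      intro i
      rw [decode_unit_py_loop]
      simp only [List.getLast_append,
        List.dropLast_concat, List.reverse_append, List.reverse_cons, List.reverse_nil,
        List.nil_append, List.cons_append, List.foldl_cons]
      simp [ih]

theorem decode_unit_py_spec : Claim_equal_decode_unit_py := by
  intro unit _
  unfold Spec_decode_unit_py decode_unit_py decode_unit_py_alt
  rcases h : unit.toList with _ | ⟨c, cs⟩
  · simp [decode_unit_py_loop]
  · simp only [h]
    rw [if_neg (by simp)]
    rw [decode_unit_py_loop_eq]
    unfold decode_unit_py_alt_parse2
    rw [List.foldl_map]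
    have hf : (fun (a : Int) (c : Char) =>
        2 * a + (if (if c = '0' then '1' else '0') = '1' then (1:Int) else 0)) =
        fun a c => 2 * a + (if c = '0' then 1 else 0) := by
      funext a c; by_cases hc : c = '0' <;> simp [hc]
    rw [hf]
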